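-- pv_equiv track=rewrite | github.com/PrathameshWable/git-merge-resolver | git_merge_resolver/utils/conflict_parser.py | build_conflicted_file
-- ===== SOURCE A (Python) =====
-- from typing import List, Tuple
--
-- def insert_conflict_markers(
--     ours_content: str,
--     theirs_content: str,
--     ours_branch: str = "HEAD",
--     theirs_branch: str = "feature-branch",
-- ) -> str:
--     """
--     Wrap two content strings in Git conflict marker format.
--
--     Args:
--         ours_content: Content from the ours (HEAD) branch.
--         theirs_content: Content from the theirs (incoming) branch.
--         ours_branch: Name of the ours branch.
--         theirs_branch: Name of the theirs branch.
--
--     Returns: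
--         A string with conflict markers inserted.
--     """
--     return (
--         f"<<<<<<< {ours_branch}\n"
--         f"{ours_content}"
--         f"=======\n"
--         f"{theirs_content}"
--         f">>>>>>> {theirs_branch}\n"
--     )
--
-- def build_conflicted_file(
--     base_lines: List[str],
--     conflict_positions: List[Tuple[int, str, str, str, str]],
-- ) -> str:
--     """
--     Build a file string with conflict markers inserted at specified positions.
--
--     Args:
--         base_lines: Lines of the base file.
--         conflict_positions: List of (line_number, ours_content, theirs_content,
--                             ours_branch, theirs_branch) tuples.
--
--     Returns:
--         File content string with conflict markers.
--     """
--     result_lines = list(base_lines)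
--     # Insert from bottom to top to preserve line numbers
--     for line_num, ours, theirs, ours_branch, theirs_branch in sorted(
--         conflict_positions, key=lambda x: x[0], reverse=True
--     ):
--         conflict_block = insert_conflict_markers(ours, theirs, ours_branch, theirs_branch)
--         conflict_lines = conflict_block.splitlines(keepends=True)
--         result_lines[line_num:line_num] = conflict_lines
--
--     return "".join(result_lines)
-- ===== SOURCE B (Python) =====
-- from typing import List, Tuple
--
-- def insert_conflict_markers(
--     ours_content: str,
--     theirs_content: str,
--     ours_branch: str = "HEAD",
--     theirs_branch: str = "feature-branch",
-- ) -> str: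
--     return (
--         f"<<<<<<< {ours_branch}\n"
--         f"{ours_content}"
--         f"=======\n"
--         f"{theirs_content}"
--         f">>>>>>> {theirs_branch}\n"
--     )
--
-- def build_conflicted_file(
--     base_lines: List[str],
--     conflict_positions: List[Tuple[int, str, str, str, str]],
-- ) -> str:
--     # Keep the document as a list of segments (a piece list) instead of one flat
--     # line list: an insertion splits at most one segment locally rather than
--     # shifting the whole tail of the document.
--     segs = [base_lines]
--     total = len(base_lines)
--     for line_num, ours, theirs, ours_branch, theirs_branch in sorted(
--         conflict_positions, key=lambda x: x[0], reverse=True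
--     ):
--         block = insert_conflict_markers(ours, theirs, ours_branch, theirs_branch).splitlines(keepends=True)
--         # slice-index clamp, as in l[i:i] = block
--         rem = max(0, total + line_num) if line_num < 0 else min(line_num, total)
--         k = 0
--         while rem > len(segs[k]):
--             rem -= len(segs[k])
--             k += 1
--         if rem == len(segs[k]):
--             segs.insert(k + 1, block)
--         else:
--             seg = segs[k]
--             segs[k:k + 1] = [seg[:rem], block, seg[rem:]]
--         total += len(block)
--     return "".join(line for seg in segs for line in seg)
-- ===== Notes on version B (the rewrite author's own statement) =====
-- stated objective: faster
-- what changed: Instead of splicing every conflict block into one flat line list (each slice assignment shifts the whole tail of the document), B keeps the document as a piece list of O(1) segment views, splits at most one segment per insertion, and joins the pieces once at the end.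
import Mathlib
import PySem

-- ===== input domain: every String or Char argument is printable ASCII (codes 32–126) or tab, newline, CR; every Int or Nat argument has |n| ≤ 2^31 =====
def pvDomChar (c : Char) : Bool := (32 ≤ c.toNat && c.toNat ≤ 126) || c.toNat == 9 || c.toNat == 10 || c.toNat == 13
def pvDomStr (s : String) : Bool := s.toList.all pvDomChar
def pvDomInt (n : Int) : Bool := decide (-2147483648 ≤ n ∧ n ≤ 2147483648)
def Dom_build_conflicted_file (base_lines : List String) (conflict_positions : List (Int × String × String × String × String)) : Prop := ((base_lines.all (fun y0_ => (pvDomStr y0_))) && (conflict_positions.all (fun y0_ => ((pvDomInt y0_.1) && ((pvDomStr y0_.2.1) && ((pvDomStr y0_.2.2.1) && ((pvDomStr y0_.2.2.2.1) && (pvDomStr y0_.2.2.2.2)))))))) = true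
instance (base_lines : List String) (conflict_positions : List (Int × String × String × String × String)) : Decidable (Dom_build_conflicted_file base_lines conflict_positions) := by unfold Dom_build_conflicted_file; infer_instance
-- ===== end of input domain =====

-- ===== PORT A =====
-- B replaces A's per-conflict whole-document list splicing by a piece list of O(1) segment
-- views split locally, merged once at the end; equivalence is proved on all inputs.

-- helper of A (and of B): insert_conflict_markers (f-string concatenation, literally)
def insert_conflict_markers (ours_content theirs_content ours_branch theirs_branch : String) : String :=
  "<<<<<<< " ++ ours_branch ++ "\n" ++ ours_content ++ "=======\n" ++ theirs_content ++ ">>>>>>> " ++ theirs_branch ++ "\n"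

-- str.splitlines(keepends=True), hand-ported: exact on Dom (whose only line boundaries are
-- '\n', '\r' and '\r\n'; Python's further boundaries \v \f \x1c-\x1e \x85 \u2028 \u2029 lie outside Dom)
def pvSlK (acc : List Char) : List Char → List (List Char)
  | [] => if acc.isEmpty then [] else [acc.reverse]
  | c :: rest =>
    if c = '\n' then (acc.reverse ++ ['\n']) :: pvSlK [] rest
    else if c = '\r' then
      if rest.head? = some '\n' then (acc.reverse ++ ['\r', '\n']) :: pvSlK [] rest.tail
      else (acc.reverse ++ ['\r']) :: pvSlK [] rest
    else pvSlK (c :: acc) rest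
termination_by cs => cs.length
decreasing_by all_goals (simp [List.length_tail]; try omega)

def pvSplitlinesKeepends (s : String) : List String :=
  (pvSlK [] s.toList).map String.ofList

def build_conflicted_file (base_lines : List String) (conflict_positions : List (Int × String × String × String × String)) : String :=
  -- result_lines = list(base_lines); insert from bottom to top over sorted(..., key=x[0], reverse=True)
  let result_lines :=
    (PySem.List.sorted conflict_positions (fun x => x.1) true).foldl
      (fun acc x =>
        let conflict_block := insert_conflict_markers x.2.1 x.2.2.1 x.2.2.2.1 x.2.2.2.2
        let conflict_lines := pvSplitlinesKeepends conflict_block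
        -- result_lines[line_num:line_num] = conflict_lines  (slice assignment clamps the index)
        let j := PySem.List.clampIdx acc.length x.1
        acc.take j ++ conflict_lines ++ acc.drop j)
      base_lines
  PySem.Str.join "" result_lines

-- ===== PORT B =====
-- B's inner while-loop: walk the piece list and place `block` after `rem` lines, splitting
-- at most one segment view.  The [] case is unreachable (rem never exceeds the remaining
-- length; in Python the loop would raise IndexError there) and only makes the port total.
def pvInsertSeg (segs : List (List String × Int × Int)) (rem : Int) (block : List String) : List (List String × Int × Int) :=
  match segs with
  | [] => [(block, 0, (block.length : Int))]
  | s :: rest =>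
    if rem > s.2.2 - s.2.1 then s :: pvInsertSeg rest (rem - (s.2.2 - s.2.1)) block
    else if rem = s.2.2 - s.2.1 then s :: (block, 0, (block.length : Int)) :: rest
    else (s.1, s.2.1, s.2.1 + rem) :: (block, 0, (block.length : Int)) :: (s.1, s.2.1 + rem, s.2.2) :: rest

def build_conflicted_file_alt (base_lines : List String) (conflict_positions : List (Int × String × String × String × String)) : String :=
  let st :=
    (PySem.List.sorted conflict_positions (fun x => x.1) true).foldl
      (fun (st : List (List String × Int × Int) × Int) x =>
        let block := pvSplitlinesKeepends (insert_conflict_markers x.2.1 x.2.2.1 x.2.2.2.1 x.2.2.2.2)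
        -- rem = max(0, total + line_num) if line_num < 0 else min(line_num, total)
        let rem : Int := if x.1 < 0 then max 0 (st.2 + x.1) else min x.1 st.2
        (pvInsertSeg st.1 rem block, st.2 + (block.length : Int)))
      ([(base_lines, 0, (base_lines.length : Int))], (base_lines.length : Int))
  -- "".join(line for lst, lo, hi in segs for line in lst[lo:hi])
  PySem.Str.join "" ((st.1.map (fun s => PySem.List.slice s.1 (some s.2.1) (some s.2.2))).flatten)

-- ===== PRECONDITION & SPEC =====
def Spec_build_conflicted_file (base_lines : List String) (conflict_positions : List (Int × String × String × String × String)) (out : String) : Prop := out = build_conflicted_file_alt base_lines conflict_positions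
instance (base_lines : List String) (conflict_positions : List (Int × String × String × String × String)) (out : String) : Decidable (Spec_build_conflicted_file base_lines conflict_positions out) := by unfold Spec_build_conflicted_file; infer_instance

-- ===== CLAIM (what is proved, stated in full; the proofs are below) =====
def Claim_equal_build_conflicted_file : Prop := ∀ (base_lines : List String) (conflict_positions : List (Int × String × String × String × String)), Dom_build_conflicted_file base_lines conflict_positions → Spec_build_conflicted_file base_lines conflict_positions (build_conflicted_file base_lines conflict_positions)

-- ===== LEMMAS AND PROOFS =====

-- the document a piece list denotes
def pvFlat (segs : List (List String × Int × Int)) : List String :=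
  (segs.map (fun s => PySem.List.slice s.1 (some s.2.1) (some s.2.2))).flatten

-- well-formed views
def pvWF (segs : List (List String × Int × Int)) : Prop :=
  ∀ s ∈ segs, 0 ≤ s.2.1 ∧ s.2.1 ≤ s.2.2 ∧ s.2.2 ≤ (s.1.length : Int)

lemma pvClamp (n : Nat) (p : Int) (h0 : 0 ≤ p) (h1 : p ≤ (n : Int)) :
    PySem.List.clampIdx n p = p.toNat := by
  simp only [PySem.List.clampIdx]
  rw [if_neg (by omega)]
  omega

lemma pvSlice_len (lst : List String) (lo hi : Int) (h0 : 0 ≤ lo) (h1 : lo ≤ hi)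
    (h2 : hi ≤ (lst.length : Int)) :
    (PySem.List.slice lst (some lo) (some hi)).length = (hi - lo).toNat := by
  rw [PySem.List.length_slice]
  have ha := PySem.List.clampIdx_le lst.length lo
  have hb := PySem.List.clampIdx_le lst.length hi
  rw [pvClamp _ _ h0 (by omega), pvClamp _ _ (by omega) h2]
  omega

lemma pvInsertSeg_flat (block : List String) :
    ∀ (segs : List (List String × Int × Int)) (rem : Int), pvWF segs → 0 ≤ rem →
      rem ≤ ((pvFlat segs).length : Int) →
      pvFlat (pvInsertSeg segs rem block)
        = (pvFlat segs).take rem.toNat ++ block ++ (pvFlat segs).drop rem.toNat := by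
  intro segs
  induction segs with
  | nil =>
      intro rem _ h0 h1
      have : rem = 0 := by simp [pvFlat] at h1; omega
      subst this
      simp [pvInsertSeg, pvFlat, PySem.List.slice_to_natCast]
  | cons s rest ih =>
      intro rem hwf h0 h1
      obtain ⟨ha, hab, hb⟩ := hwf s (by simp)
      have hwf' : pvWF rest := fun y hy => hwf y (by simp [hy])
      have hsl : (PySem.List.slice s.1 (some s.2.1) (some s.2.2)).length = (s.2.2 - s.2.1).toNat :=
        pvSlice_len _ _ _ ha hab hb
      have hflat : pvFlat (s :: rest)
          = PySem.List.slice s.1 (some s.2.1) (some s.2.2) ++ pvFlat rest := by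
        simp [pvFlat]
      rw [hflat] at h1 ⊢
      simp only [pvInsertSeg]
      split_ifs with hgt heq
      · -- walk past this segment
        have h1' : rem - (s.2.2 - s.2.1) ≤ ((pvFlat rest).length : Int) := by
          rw [List.length_append] at h1; push_cast at h1 ⊢; omega
        rw [show pvFlat (s :: pvInsertSeg rest (rem - (s.2.2 - s.2.1)) block)
            = PySem.List.slice s.1 (some s.2.1) (some s.2.2)
              ++ pvFlat (pvInsertSeg rest (rem - (s.2.2 - s.2.1)) block) from by simp [pvFlat]]
        rw [ih (rem - (s.2.2 - s.2.1)) hwf' (by omega) h1']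
        rw [List.take_append, List.drop_append]
        rw [List.take_of_length_le (show (PySem.List.slice s.1 (some s.2.1) (some s.2.2)).length ≤ rem.toNat by omega), List.drop_eq_nil_of_le (show (PySem.List.slice s.1 (some s.2.1) (some s.2.2)).length ≤ rem.toNat by omega)]
        have : rem.toNat - (PySem.List.slice s.1 (some s.2.1) (some s.2.2)).length
            = (rem - (s.2.2 - s.2.1)).toNat := by omega
        rw [this]
        simp
      · -- exactly at the end of this segment
        rw [show pvFlat (s :: (block, 0, (block.length : Int)) :: rest)
            = PySem.List.slice s.1 (some s.2.1) (some s.2.2)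
              ++ (PySem.List.slice block (some 0) (some (block.length : Int)) ++ pvFlat rest) from by
          simp [pvFlat]]
        rw [List.take_append, List.drop_append]
        rw [List.take_of_length_le (show (PySem.List.slice s.1 (some s.2.1) (some s.2.2)).length ≤ rem.toNat by omega), List.drop_eq_nil_of_le (show (PySem.List.slice s.1 (some s.2.1) (some s.2.2)).length ≤ rem.toNat by omega)]
        rw [show rem.toNat - (PySem.List.slice s.1 (some s.2.1) (some s.2.2)).length = 0 by omega]
        simp [PySem.List.slice_to_natCast]
      · -- split this segment
        have hlt : rem < s.2.2 - s.2.1 := by omega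
        have e1 : PySem.List.slice s.1 (some s.2.1) (some (s.2.1 + rem))
            = (PySem.List.slice s.1 (some s.2.1) (some s.2.2)).take rem.toNat := by
          rw [PySem.List.slice_toNat _ ha (by omega), PySem.List.slice_toNat _ ha (by omega),
            List.take_take]
          congr 1
          omega
        have e2 : PySem.List.slice s.1 (some (s.2.1 + rem)) (some s.2.2)
            = (PySem.List.slice s.1 (some s.2.1) (some s.2.2)).drop rem.toNat := by
          rw [PySem.List.slice_toNat _ (by omega) (by omega), PySem.List.slice_toNat _ ha (by omega),
            List.drop_take, List.drop_drop,
            show (s.2.1 + rem).toNat = s.2.1.toNat + rem.toNat by omega]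
          congr 1
          omega
        rw [show pvFlat ((s.1, s.2.1, s.2.1 + rem) :: (block, 0, (block.length : Int)) :: (s.1, s.2.1 + rem, s.2.2) :: rest)
            = PySem.List.slice s.1 (some s.2.1) (some (s.2.1 + rem))
              ++ (PySem.List.slice block (some 0) (some (block.length : Int))
                ++ (PySem.List.slice s.1 (some (s.2.1 + rem)) (some s.2.2) ++ pvFlat rest)) from by
          simp [pvFlat]]
        rw [List.take_append, List.drop_append]
        rw [show rem.toNat - (PySem.List.slice s.1 (some s.2.1) (some s.2.2)).length = 0 by omega]
        rw [e1, e2]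
        simp [PySem.List.slice_to_natCast]

lemma pvInsertSeg_wf (block : List String) :
    ∀ (segs : List (List String × Int × Int)) (rem : Int), pvWF segs → 0 ≤ rem →
      pvWF (pvInsertSeg segs rem block) := by
  intro segs
  induction segs with
  | nil =>
      intro rem _ _ y hy
      simp [pvInsertSeg] at hy
      simp [hy]
  | cons s rest ih =>
      intro rem hwf h0 y hy
      obtain ⟨ha, hab, hb⟩ := hwf s (by simp)
      have hwf' : pvWF rest := fun z hz => hwf z (by simp [hz])
      simp only [pvInsertSeg] at hy
      split_ifs at hy with hgt heq
      · rcases List.mem_cons.mp hy with rfl | hy'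
        · exact ⟨ha, hab, hb⟩
        · exact ih (rem - (s.2.2 - s.2.1)) hwf' (by omega) y hy'
      · rcases List.mem_cons.mp hy with rfl | hy'
        · exact ⟨ha, hab, hb⟩
        · rcases List.mem_cons.mp hy' with rfl | hy''
          · refine ⟨by simp, by simp, by simp⟩
          · exact hwf' y hy''
      · rcases List.mem_cons.mp hy with rfl | hy'
        · refine ⟨by simpa using ha, by simpa using (by omega : s.2.1 ≤ s.2.1 + rem), by simp; omega⟩
        · rcases List.mem_cons.mp hy' with rfl | hy''
          · refine ⟨by simp, by simp, by simp⟩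
          · rcases List.mem_cons.mp hy'' with rfl | hy3
            · refine ⟨by simp; omega, by simp; omega, by simpa using hb⟩
            · exact hwf' y hy3

lemma pvMain : ∀ (L : List (Int × String × String × String × String))
    (doc : List String) (segs : List (List String × Int × Int)) (total : Int),
    pvFlat segs = doc → pvWF segs → total = (doc.length : Int) →
    L.foldl
      (fun acc x =>
        acc.take (PySem.List.clampIdx acc.length x.1)
          ++ pvSplitlinesKeepends (insert_conflict_markers x.2.1 x.2.2.1 x.2.2.2.1 x.2.2.2.2)
          ++ acc.drop (PySem.List.clampIdx acc.length x.1))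
      doc
      = pvFlat (L.foldl
          (fun (st : List (List String × Int × Int) × Int) x =>
            (pvInsertSeg st.1
                (if x.1 < 0 then max 0 (st.2 + x.1) else min x.1 st.2)
                (pvSplitlinesKeepends (insert_conflict_markers x.2.1 x.2.2.1 x.2.2.2.1 x.2.2.2.2)),
             st.2 + ((pvSplitlinesKeepends (insert_conflict_markers x.2.1 x.2.2.1 x.2.2.2.1 x.2.2.2.2)).length : Int)))
          (segs, total)).1 := by
  intro L
  induction L with
  | nil =>
      intro doc segs total hflat _ _
      simpa using hflat.symm
  | cons x L' ih =>
      intro doc segs total hflat hwf htot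
      subst htot
      rw [List.foldl_cons, List.foldl_cons]
      set bl := pvSplitlinesKeepends (insert_conflict_markers x.2.1 x.2.2.1 x.2.2.2.1 x.2.2.2.2) with hbl
      set rem : Int := if x.1 < 0 then max 0 ((doc.length : Int) + x.1) else min x.1 ((doc.length : Int)) with hrem
      have h0 : 0 ≤ rem := by rw [hrem]; split_ifs <;> omega
      have h1 : rem ≤ (doc.length : Int) := by rw [hrem]; split_ifs <;> omega
      have hj : PySem.List.clampIdx doc.length x.1 = rem.toNat := by
        rw [hrem]
        simp only [PySem.List.clampIdx]
        split_ifs <;> omega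
      rw [hj]
      have hflat' : pvFlat (pvInsertSeg segs rem bl) = doc.take rem.toNat ++ bl ++ doc.drop rem.toNat := by
        rw [pvInsertSeg_flat bl segs rem hwf h0 (by rw [hflat]; exact h1), hflat]
      exact ih (doc.take rem.toNat ++ bl ++ doc.drop rem.toNat) (pvInsertSeg segs rem bl)
        ((doc.length : Int) + (bl.length : Int)) hflat' (pvInsertSeg_wf bl segs rem hwf h0)
        (by simp [List.length_append]; omega)

-- ===== VERDICT (by name: the statement is the Claim_ definition above) =====
theorem build_conflicted_file_spec : Claim_equal_build_conflicted_file := by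
  unfold Claim_equal_build_conflicted_file
  intro base cp _
  unfold Spec_build_conflicted_file
  simp only [build_conflicted_file, build_conflicted_file_alt]
  apply congrArg
  refine pvMain (PySem.List.sorted cp (fun x => x.1) true) base
    [(base, 0, (base.length : Int))] (base.length : Int) ?_ ?_ rfl
  · simp [pvFlat, PySem.List.slice_to_natCast]
  · intro s hs
    simp at hs
    simp [hs]
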